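-- pv_equiv track=rewrite | github.com/ej200CE/Dutchie | hackathon/src/billion_hackathon/modules/evidence_aggregation/service.py | _uf_project_to_canonical
-- ===== SOURCE A (Python) =====
-- def _uf_project_to_canonical(ids: set[str], pairs: list[tuple[str, str]]) -> dict[str, str]:
--     """For each id in the universe, return representative (min in UF component)."""
--     parent: dict[str, str] = {x: x for x in ids}
--     for a, b in pairs:
--         parent.setdefault(a, a)
--         parent.setdefault(b, b)
--
--     def p(x: str) -> str:
--         if parent.get(x, x) != x:
--             parent[x] = p(parent[x])
--         return parent.get(x, x)
--
--     def u(a: str, b: str) -> None: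
--         ra, rb = p(a), p(b)
--         if ra == rb:
--             return
--         if ra < rb:
--             parent[rb] = ra
--         else:
--             parent[ra] = rb
--
--     for a, b in pairs:
--         u(a, b)
--     for x in set(ids):
--         parent.setdefault(x, x)
--     return {x: p(x) for x in set(ids) | set(parent)}
-- ===== SOURCE B (Python) =====
-- def _uf_project_to_canonical(ids: set[str], pairs: list[tuple[str, str]]) -> dict[str, str]:
--     """For each id in the universe, return representative (min in component)."""
--     nodes = list(dict.fromkeys(list(ids) + [v for p in pairs for v in p]))
--     labels = {v: v for v in nodes}
--     while True:
--         prev = dict(labels)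
--         for a, b in pairs:
--             m = min(labels[a], labels[b])
--             labels[a] = m
--             labels[b] = m
--         if labels == prev:
--             break
--     return {v: labels[v] for v in nodes}
-- ===== Notes on version B (the rewrite author's own statement) =====
-- stated objective: alternative
-- what changed: Replaces the recursive union-find (path compression + union-by-min) with a min-label propagation over the pairs, iterated in rounds until a fixpoint, then emitting the labels over the deduplicated node universe.
import Mathlib
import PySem

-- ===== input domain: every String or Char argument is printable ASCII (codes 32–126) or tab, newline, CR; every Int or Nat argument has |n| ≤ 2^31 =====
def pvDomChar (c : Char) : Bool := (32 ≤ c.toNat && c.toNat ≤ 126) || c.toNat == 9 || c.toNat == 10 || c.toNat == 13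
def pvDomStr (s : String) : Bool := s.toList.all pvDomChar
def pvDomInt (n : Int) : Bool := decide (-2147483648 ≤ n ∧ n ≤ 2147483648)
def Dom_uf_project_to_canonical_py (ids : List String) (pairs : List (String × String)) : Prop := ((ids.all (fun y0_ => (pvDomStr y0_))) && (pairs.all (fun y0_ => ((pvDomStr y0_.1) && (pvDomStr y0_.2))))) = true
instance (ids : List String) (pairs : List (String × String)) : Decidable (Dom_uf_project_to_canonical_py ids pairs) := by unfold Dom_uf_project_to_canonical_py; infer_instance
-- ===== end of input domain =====

-- Header: B replaces A's recursive union-find (path compression, union-by-min) with min-label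
-- propagation over the pairs iterated to a fixpoint; same return value, different algorithm
-- (objective: alternative).  The output dict is emitted over the deduplicated node universe
-- in first-occurrence order (Python's set/dict iteration order is not part of the claim; dict
-- outputs are compared as key→value maps).

-- ===== PORT A =====
abbrev UFD := PySem.Dict String String

-- Python's recursive `p` (find with path compression); the Nat fuel only guards termination
-- (a parent chain strictly decreases in string order, so `d.size` steps always suffice).
def ufFind : Nat → UFD → String → String × UFD
  | 0, d, x => (d.getD x x, d)
  | fuel+1, d, x =>
    let px := d.getD x x
    if px ≠ x then
      let rd := ufFind fuel d px
      let d2 := rd.2.insert x rd.1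
      (d2.getD x x, d2)
    else (d.getD x x, d)

-- Python's `u`
def ufUnion (d : UFD) (a b : String) : UFD :=
  let fa := ufFind d.size d a
  let fb := ufFind fa.2.size fa.2 b
  if fa.1 = fb.1 then fb.2
  else if fa.1 < fb.1 then fb.2.insert fb.1 fa.1
  else fb.2.insert fa.1 fb.1

def uf_project_to_canonical_py (ids : List String) (pairs : List (String × String)) : List (String × String) :=
  let p0 := ids.foldl (fun d x => d.insert x x) (PySem.Dict.empty : UFD)
  let p1 := pairs.foldl (fun d pr => (d.setdefault pr.1 pr.1).setdefault pr.2 pr.2) p0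
  let p2 := pairs.foldl (fun d pr => ufUnion d pr.1 pr.2) p1
  let p3 := (PySem.Set.ofList ids).foldl (fun d x => d.setdefault x x) p2
  let univ : List String := (PySem.Set.ofList ids).update p3.keys
  let fin := univ.foldl (fun (acc : UFD × UFD) x =>
      let rd := ufFind acc.2.size acc.2 x
      (acc.1.insert x rd.1, rd.2)) ((PySem.Dict.empty : UFD), p3)
  fin.1.items

-- ===== PORT B =====
-- one pass over the pairs, pulling both endpoint labels down to their minimum
def lpStep (l : UFD) (pr : String × String) : UFD :=
  let la := l.getD pr.1 pr.1
  let lb := l.getD pr.2 pr.2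
  let m := if la ≤ lb then la else lb
  (l.insert pr.1 m).insert pr.2 m

def lpRound (pairs : List (String × String)) (l : UFD) : UFD :=
  pairs.foldl lpStep l

-- Python's `while True: … if labels == prev: break`; the fuel n*n+1 only guards termination
-- (each non-final round strictly lowers some label within the node universe, proved below).
def lpLoop : Nat → List (String × String) → UFD → UFD
  | 0, _, l => l
  | fuel+1, pairs, l =>
    let l' := lpRound pairs l
    if l' = l then l else lpLoop fuel pairs l'

def uf_project_to_canonical_py_alt (ids : List String) (pairs : List (String × String)) : List (String × String) :=
  let nodes := PySem.List.dedup (ids ++ pairs.flatMap (fun pr => [pr.1, pr.2]))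
  let l0 := nodes.foldl (fun d v => d.insert v v) (PySem.Dict.empty : UFD)
  let lf := lpLoop (nodes.length * nodes.length + 1) pairs l0
  (nodes.foldl (fun d v => d.insert v (lf.getD v v)) (PySem.Dict.empty : UFD)).items

-- ===== PRECONDITION & SPEC =====
def Spec_uf_project_to_canonical_py (ids : List String) (pairs : List (String × String)) (out : List (String × String)) : Prop := out = uf_project_to_canonical_py_alt ids pairs
instance (ids : List String) (pairs : List (String × String)) (out : List (String × String)) : Decidable (Spec_uf_project_to_canonical_py ids pairs out) := by unfold Spec_uf_project_to_canonical_py; infer_instance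

-- ===== CLAIM (what is proved, stated in full; the proofs are below) =====
def Claim_equal_uf_project_to_canonical_py : Prop := ∀ (ids : List String) (pairs : List (String × String)), Dom_uf_project_to_canonical_py ids pairs → Spec_uf_project_to_canonical_py ids pairs (uf_project_to_canonical_py ids pairs)

-- ===== LEMMAS AND PROOFS =====

-- `pf d x` = Python's `parent.get(x, x)` / `labels[x]`
def pf (d : UFD) (x : String) : String := d.getD x x

-- well-formed parent map: parents strictly decrease and stay inside the key set
def DecD (d : UFD) : Prop :=
  d.keys.Nodup ∧ ∀ x, pf d x = x ∨ (pf d x < x ∧ pf d x ∈ d.keys ∧ x ∈ d.keys)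

def muD (d : UFD) (x : String) : Nat := (d.keys.filter (fun k => decide (k < x))).length

def rootN : Nat → UFD → String → String
  | 0, _, x => x
  | n+1, d, x => if pf d x = x then x else rootN n d (pf d x)

def Root (d : UFD) (x : String) : String := rootN d.size d x

theorem filter_lt_mono_le {l : List String} {a b : String} (hab : a ≤ b) :
    (l.filter (fun k => decide (k < a))).length ≤ (l.filter (fun k => decide (k < b))).length := by
  induction l with
  | nil => simp
  | cons x t ih =>
    simp only [List.filter_cons]
    by_cases hxa : x < a
    · rw [if_pos (by simpa using hxa), if_pos (by simpa using lt_of_lt_of_le hxa hab)]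
      simpa using ih
    · rw [if_neg (by simpa using hxa)]
      by_cases hxb : x < b
      · rw [if_pos (by simpa using hxb)]
        simp only [List.length_cons]
        omega
      · rw [if_neg (by simpa using hxb)]
        exact ih

theorem filter_lt_strict {l : List String} {a b : String} (hab : a < b) (ha : a ∈ l) :
    (l.filter (fun k => decide (k < a))).length < (l.filter (fun k => decide (k < b))).length := by
  induction l with
  | nil => cases ha
  | cons x t ih =>
    simp only [List.filter_cons]
    rcases List.mem_cons.mp ha with hx | hx
    · subst hx
      rw [if_neg (by simp), if_pos (by simpa using hab)]
      simp only [List.length_cons]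
      exact Nat.lt_succ_of_le (filter_lt_mono_le (le_of_lt hab))
    · have hlt := ih hx
      by_cases hxa : x < a
      · rw [if_pos (by simpa using hxa), if_pos (by simpa using lt_trans hxa hab)]
        simpa using hlt
      · rw [if_neg (by simpa using hxa)]
        by_cases hxb : x < b
        · rw [if_pos (by simpa using hxb)]
          simp only [List.length_cons]
          omega
        · rw [if_neg (by simpa using hxb)]
          exact hlt

theorem keys_length_eq_size (d : UFD) : d.keys.length = d.size := by
  simp [PySem.Dict.keys, PySem.Dict.size]

theorem mu_le_size (d : UFD) (x : String) : muD d x ≤ d.size := by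
  have := List.length_filter_le (fun k => decide (k < x)) d.keys
  have h2 := keys_length_eq_size d
  unfold muD; omega

theorem mu_lt_parent {d : UFD} {x : String} (h : DecD d) (hx : pf d x ≠ x) :
    muD d (pf d x) < muD d x := by
  rcases h.2 x with h1 | ⟨hlt, hmem, _⟩
  · exact absurd h1 hx
  · exact filter_lt_strict hlt hmem

theorem mu_zero_fix {d : UFD} {x : String} (h : DecD d) (h0 : muD d x = 0) : pf d x = x := by
  rcases h.2 x with h1 | ⟨hlt, hmem, _⟩
  · exact h1
  · exfalso
    have : pf d x ∈ d.keys.filter (fun k => decide (k < x)) :=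
      List.mem_filter.mpr ⟨hmem, by simpa using hlt⟩
    have := List.length_pos_of_mem this
    unfold muD at h0; omega

theorem rootN_fix {d : UFD} {x : String} (h : pf d x = x) : ∀ n, rootN n d x = x := by
  intro n; cases n <;> simp [rootN, h]

theorem rootN_congr {d : UFD} (h : DecD d) :
    ∀ f1 {x : String} (f2 : Nat), muD d x ≤ f1 → muD d x ≤ f2 → rootN f1 d x = rootN f2 d x := by
  intro f1
  induction f1 with
  | zero =>
    intro x f2 h1 _
    have hfix : pf d x = x := mu_zero_fix h (Nat.le_zero.mp h1)
    rw [rootN_fix hfix, rootN_fix hfix]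
  | succ n ih =>
    intro x f2 h1 h2
    cases f2 with
    | zero =>
      have hfix : pf d x = x := mu_zero_fix h (Nat.le_zero.mp h2)
      rw [rootN_fix hfix, rootN_fix hfix]
    | succ m =>
      by_cases hfix : pf d x = x
      · rw [rootN_fix hfix, rootN_fix hfix]
      · have hmu := mu_lt_parent h hfix
        simp only [rootN, hfix, if_false]
        exact ih m (by omega) (by omega)

theorem root_eq_rootN {d : UFD} {x : String} (h : DecD d) {f : Nat} (hf : muD d x ≤ f) :
    Root d x = rootN f d x :=
  rootN_congr h d.size f (mu_le_size d x) hf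

theorem Root_fix {d : UFD} {x : String} (h : pf d x = x) : Root d x = x := rootN_fix h _

theorem Root_step {d : UFD} {x : String} (h : DecD d) (hx : pf d x ≠ x) :
    Root d x = Root d (pf d x) := by
  have hmu := mu_lt_parent h hx
  have h1 : Root d x = rootN (muD d x) d x := root_eq_rootN h (le_refl _)
  obtain ⟨m, hm⟩ := Nat.exists_eq_succ_of_ne_zero (show muD d x ≠ 0 by omega)
  have hle : muD d (pf d x) ≤ m := by omega
  rw [h1, hm]
  simp only [rootN, hx, if_false]
  exact (root_eq_rootN h hle).symm

theorem root_props {d : UFD} (h : DecD d) :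
    ∀ n (x : String), muD d x ≤ n →
      Root d x ≤ x ∧ pf d (Root d x) = Root d x ∧ (x ∈ d.keys → Root d x ∈ d.keys) := by
  intro n
  induction n with
  | zero =>
    intro x hx
    have hfix : pf d x = x := mu_zero_fix h (Nat.le_zero.mp hx)
    rw [Root_fix hfix]
    exact ⟨le_refl _, hfix, fun hk => hk⟩
  | succ n ih =>
    intro x hx
    by_cases hfix : pf d x = x
    · rw [Root_fix hfix]; exact ⟨le_refl _, hfix, fun hk => hk⟩
    · rcases h.2 x with h1 | ⟨hlt, hmem, _⟩
      · exact absurd h1 hfix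
      · have hmu := mu_lt_parent h hfix
        have hrec := ih (pf d x) (by omega)
        rw [Root_step h hfix]
        exact ⟨le_trans hrec.1 (le_of_lt hlt), hrec.2.1, fun _ => hrec.2.2 hmem⟩

theorem root_le {d : UFD} (h : DecD d) (x : String) : Root d x ≤ x :=
  (root_props h (muD d x) x (le_refl _)).1

theorem root_fixpt {d : UFD} (h : DecD d) (x : String) : pf d (Root d x) = Root d x :=
  (root_props h (muD d x) x (le_refl _)).2.1

theorem root_mem {d : UFD} (h : DecD d) {x : String} (hx : x ∈ d.keys) : Root d x ∈ d.keys :=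
  (root_props h (muD d x) x (le_refl _)).2.2 hx

theorem pf_insert (d : UFD) (k v y : String) :
    pf (d.insert k v) y = if y = k then v else pf d y := by
  simp [pf, PySem.Dict.getD_insert]

-- path compression preserves the key set, well-formedness and every root
theorem compress {d : UFD} {x r : String} (h : DecD d) (hx : x ∈ d.keys) (hr : r = Root d x) :
    DecD (d.insert x r) ∧ (d.insert x r).keys = d.keys ∧
      ∀ y, Root (d.insert x r) y = Root d y := by
  have hc : d.contains x = true := (PySem.Dict.contains_iff_mem_keys d x).mpr hx
  have hkeys : (d.insert x r).keys = d.keys := PySem.Dict.keys_insert_of_contains d r hc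
  have hrle : r ≤ x := hr ▸ root_le h x
  have hrmem : r ∈ d.keys := hr ▸ root_mem h hx
  have hdec : DecD (d.insert x r) := by
    refine ⟨hkeys ▸ h.1, fun y => ?_⟩
    rw [pf_insert]
    by_cases hy : y = x
    · subst hy
      simp only [if_true]
      rcases eq_or_lt_of_le hrle with heq | hlt
      · exact Or.inl heq
      · exact Or.inr ⟨hlt, hkeys ▸ hrmem, hkeys ▸ hx⟩
    · simp only [hy, if_false]
      rcases h.2 y with h1 | ⟨hlt, hm1, hm2⟩
      · exact Or.inl h1
      · exact Or.inr ⟨hlt, hkeys ▸ hm1, hkeys ▸ hm2⟩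
  refine ⟨hdec, hkeys, ?_⟩
  have hroot_x : Root (d.insert x r) x = Root d x := by
    by_cases hrx : r = x
    · have : pf (d.insert x r) x = x := by rw [pf_insert]; simp [hrx]
      rw [Root_fix this]
      exact hrx ▸ hr
    · have hpf : pf (d.insert x r) x = r := by rw [pf_insert]; simp
      have hstep : Root (d.insert x r) x = Root (d.insert x r) r := by
        have hpfne : pf (d.insert x r) x ≠ x := by rw [hpf]; exact hrx
        have h' := Root_step hdec hpfne
        rwa [hpf] at h'
      have hpfr : pf (d.insert x r) r = r := by
        rw [pf_insert]; simp only [hrx, if_false]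
        exact hr ▸ root_fixpt h x
      rw [hstep, Root_fix hpfr, hr]
  have haux : ∀ n y, muD d y ≤ n → Root (d.insert x r) y = Root d y := by
    intro n
    induction n with
    | zero =>
      intro y hy
      by_cases hyx : y = x
      · subst hyx; exact hroot_x
      · have hfix : pf d y = y := mu_zero_fix h (Nat.le_zero.mp hy)
        have : pf (d.insert x r) y = y := by rw [pf_insert]; simp [hyx, hfix]
        rw [Root_fix this, Root_fix hfix]
    | succ n ih =>
      intro y hy
      by_cases hyx : y = x
      · subst hyx; exact hroot_x
      · have hpf : pf (d.insert x r) y = pf d y := by rw [pf_insert]; simp [hyx]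
        by_cases hfix : pf d y = y
        · rw [Root_fix (hpf.trans hfix), Root_fix hfix]
        · have hmu := mu_lt_parent h hfix
          rw [Root_step hdec (by rw [hpf]; exact hfix), Root_step h hfix, hpf]
          exact ih (pf d y) (by omega)
  exact fun y => haux (muD d y) y (le_refl _)

-- find computes the root, keeps keys/well-formedness, preserves every root
theorem find_spec {d : UFD} (h : DecD d) :
    ∀ fuel (x : String), muD d x ≤ fuel →
      (ufFind fuel d x).1 = Root d x ∧ DecD (ufFind fuel d x).2 ∧
      (ufFind fuel d x).2.keys = d.keys ∧ ∀ y, Root (ufFind fuel d x).2 y = Root d y := by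
  intro fuel
  induction fuel with
  | zero =>
    intro x hx
    have hfix : pf d x = x := mu_zero_fix h (Nat.le_zero.mp hx)
    refine ⟨?_, h, rfl, fun _ => rfl⟩
    show d.getD x x = Root d x
    rw [show d.getD x x = pf d x from rfl, hfix, Root_fix hfix]
  | succ n ih =>
    intro x hx
    by_cases hfix : pf d x = x
    · have hred : ufFind (n+1) d x = (d.getD x x, d) := by
        simp only [ufFind]
        rw [if_neg (by simp only [ne_eq, not_not]; exact hfix)]
      rw [hred]
      exact ⟨by rw [show d.getD x x = pf d x from rfl, hfix, Root_fix hfix], h, rfl, fun _ => rfl⟩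
    · rcases h.2 x with h1 | ⟨hlt, hm1, hm2⟩
      · exact absurd h1 hfix
      · have hmu := mu_lt_parent h hfix
        have hrec := ih (pf d x) (by omega)
        have hred : ufFind (n+1) d x =
            ((((ufFind n d (pf d x)).2.insert x (ufFind n d (pf d x)).1).getD x x),
              (((ufFind n d (pf d x)).2.insert x (ufFind n d (pf d x)).1))) := by
          simp only [ufFind]
          rw [if_pos (by simpa using hfix)]
          rfl
        rw [hred]
        set rd := ufFind n d (pf d x) with hrd
        have hr1 : rd.1 = Root d (pf d x) := hrec.1
        have hr1' : rd.1 = Root rd.2 x := by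
          rw [hr1, ← Root_step h hfix, ← hrec.2.2.2 x]
        have hxk : x ∈ rd.2.keys := hrec.2.2.1 ▸ hm2
        obtain ⟨hdec2, hkeys2, hroots2⟩ := compress hrec.2.1 hxk hr1'
        refine ⟨?_, hdec2, hkeys2.trans hrec.2.2.1, fun y => (hroots2 y).trans (hrec.2.2.2 y)⟩
        show (rd.2.insert x rd.1).getD x x = Root d x
        rw [show (rd.2.insert x rd.1).getD x x = pf (rd.2.insert x rd.1) x from rfl, pf_insert]
        simp only [if_true, hr1]
        exact (Root_step h hfix).symm

-- linking the two roots: every root through the absorbed root q is redirected to p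
theorem link {d : UFD} {p q : String} (h : DecD d) (hp : pf d p = p) (hq : pf d q = q)
    (hpq : p ≠ q) (hplt : p < q) (hpk : p ∈ d.keys) (hqk : q ∈ d.keys) :
    DecD (d.insert q p) ∧ (d.insert q p).keys = d.keys ∧
      ∀ y, Root (d.insert q p) y = if Root d y = q then p else Root d y := by
  have hc : d.contains q = true := (PySem.Dict.contains_iff_mem_keys d q).mpr hqk
  have hkeys : (d.insert q p).keys = d.keys := PySem.Dict.keys_insert_of_contains d p hc
  have hdec : DecD (d.insert q p) := by
    refine ⟨hkeys ▸ h.1, fun y => ?_⟩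
    rw [pf_insert]
    by_cases hy : y = q
    · subst hy
      simp only [if_true]
      exact Or.inr ⟨hplt, hkeys ▸ hpk, hkeys ▸ hqk⟩
    · simp only [hy, if_false]
      rcases h.2 y with h1 | ⟨hlt, hm1, hm2⟩
      · exact Or.inl h1
      · exact Or.inr ⟨hlt, hkeys ▸ hm1, hkeys ▸ hm2⟩
  have hroot_q : Root (d.insert q p) q = p := by
    have hpf : pf (d.insert q p) q = p := by rw [pf_insert]; simp
    have hstep : Root (d.insert q p) q = Root (d.insert q p) p := by
      have hpfne : pf (d.insert q p) q ≠ q := by rw [hpf]; exact hpq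
      have h' := Root_step hdec hpfne
      rwa [hpf] at h'
    have hpfp : pf (d.insert q p) p = p := by
      rw [pf_insert]; simp only [hpq, if_false]; exact hp
    rw [hstep, Root_fix hpfp]
  refine ⟨hdec, hkeys, ?_⟩
  have haux : ∀ n y, muD d y ≤ n →
      Root (d.insert q p) y = if Root d y = q then p else Root d y := by
    intro n
    induction n with
    | zero =>
      intro y hy
      by_cases hyq : y = q
      · subst hyq; rw [hroot_q, Root_fix hq]; simp
      · have hfix : pf d y = y := mu_zero_fix h (Nat.le_zero.mp hy)
        have : pf (d.insert q p) y = y := by rw [pf_insert]; simp [hyq, hfix]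
        rw [Root_fix this, Root_fix hfix]
        simp [hyq]
    | succ n ih =>
      intro y hy
      by_cases hyq : y = q
      · subst hyq; rw [hroot_q, Root_fix hq]; simp
      · have hpf : pf (d.insert q p) y = pf d y := by rw [pf_insert]; simp [hyq]
        by_cases hfix : pf d y = y
        · rw [Root_fix (hpf.trans hfix), Root_fix hfix]; simp [hyq]
        · have hmu := mu_lt_parent h hfix
          rw [Root_step hdec (by rw [hpf]; exact hfix), Root_step h hfix, hpf]
          exact ih (pf d y) (by omega)
  exact fun y => haux (muD d y) y (le_refl _)

theorem linkIff {R : String → String} {p q : String} (hpq : p ≠ q) (x y : String) :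
    ((if R x = q then p else R x) = (if R y = q then p else R y)) ↔
      (R x = R y ∨ (R x = p ∧ R y = q) ∨ (R x = q ∧ R y = p)) := by
  constructor
  · intro hh
    split_ifs at hh with h1 h2 h2
    · exact Or.inl (h1.trans h2.symm)
    · exact Or.inr (Or.inr ⟨h1, hh.symm⟩)
    · exact Or.inr (Or.inl ⟨hh, h2⟩)
    · exact Or.inl hh
  · intro hh
    rcases hh with hh | ⟨hh1, hh2⟩ | ⟨hh1, hh2⟩
    · rw [hh]
    · rw [if_neg (by rw [hh1]; exact hpq), if_pos hh2]; exact hh1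
    · rw [if_pos hh1, if_neg (by rw [hh2]; exact hpq)]; exact hh2.symm

theorem union_spec {d : UFD} {a b : String} (h : DecD d) (ha : a ∈ d.keys) (hb : b ∈ d.keys) :
    DecD (ufUnion d a b) ∧ (ufUnion d a b).keys = d.keys ∧
      ∀ x y, Root (ufUnion d a b) x = Root (ufUnion d a b) y ↔
        (Root d x = Root d y ∨ (Root d x = Root d a ∧ Root d y = Root d b) ∨
          (Root d x = Root d b ∧ Root d y = Root d a)) := by
  obtain ⟨ha1, hdec1, hkeys1, hroots1⟩ := find_spec h d.size a (mu_le_size d a)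
  set fa := ufFind d.size d a with hfa_def
  obtain ⟨hb1, hdec2, hkeys2, hroots2⟩ := find_spec hdec1 fa.2.size b (mu_le_size fa.2 b)
  set fb := ufFind fa.2.size fa.2 b with hfb_def
  have hra : fa.1 = Root d a := ha1
  have hrb : fb.1 = Root d b := hb1.trans (hroots1 b)
  have hkeys : fb.2.keys = d.keys := hkeys2.trans hkeys1
  have hroots : ∀ y, Root fb.2 y = Root d y := fun y => (hroots2 y).trans (hroots1 y)
  have hu : ufUnion d a b = (if fa.1 = fb.1 then fb.2
      else if fa.1 < fb.1 then fb.2.insert fb.1 fa.1 else fb.2.insert fa.1 fb.1) := rfl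
  rw [hu]
  have hpa : pf fb.2 fa.1 = fa.1 := by
    have h1 : fa.1 = Root fb.2 a := by rw [hra, ← hroots a]
    rw [h1]; exact root_fixpt hdec2 a
  have hpb : pf fb.2 fb.1 = fb.1 := by
    have h1 : fb.1 = Root fb.2 b := by rw [hrb, ← hroots b]
    rw [h1]; exact root_fixpt hdec2 b
  have hka : fa.1 ∈ fb.2.keys := by
    have h1 : fa.1 = Root fb.2 a := by rw [hra, ← hroots a]
    rw [h1]; exact root_mem hdec2 (hkeys ▸ ha)
  have hkb : fb.1 ∈ fb.2.keys := by
    have h1 : fb.1 = Root fb.2 b := by rw [hrb, ← hroots b]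
    rw [h1]; exact root_mem hdec2 (hkeys ▸ hb)
  by_cases heq : fa.1 = fb.1
  · rw [if_pos heq]
    refine ⟨hdec2, hkeys, fun x y => ?_⟩
    rw [hroots x, hroots y]
    have hab : Root d a = Root d b := by rw [← hra, ← hrb, heq]
    constructor
    · exact fun hh => Or.inl hh
    · rintro (hh | ⟨h1, h2⟩ | ⟨h1, h2⟩)
      · exact hh
      · rw [h1, h2, hab]
      · rw [h1, h2, hab]
  · rw [if_neg heq]
    by_cases hltc : fa.1 < fb.1
    · rw [if_pos hltc]
      obtain ⟨hd3, hk3, hr3⟩ := link hdec2 hpa hpb heq hltc hka hkb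
      refine ⟨hd3, hk3.trans hkeys, fun x y => ?_⟩
      rw [hr3 x, hr3 y, linkIff heq x y]
      simp only [hroots, hra, hrb]
    · rw [if_neg hltc]
      have hgt : fb.1 < fa.1 := by
        rcases lt_trichotomy fa.1 fb.1 with hh | hh | hh
        · exact absurd hh hltc
        · exact absurd hh heq
        · exact hh
      obtain ⟨hd3, hk3, hr3⟩ := link hdec2 hpb hpa (Ne.symm heq) hgt hkb hka
      refine ⟨hd3, hk3.trans hkeys, fun x y => ?_⟩
      rw [hr3 x, hr3 y, linkIff (Ne.symm heq) x y]
      simp only [hroots, hra, hrb]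
      constructor
      · rintro (hh | ⟨h1, h2⟩ | ⟨h1, h2⟩)
        · exact Or.inl hh
        · exact Or.inr (Or.inr ⟨h1, h2⟩)
        · exact Or.inr (Or.inl ⟨h1, h2⟩)
      · rintro (hh | ⟨h1, h2⟩ | ⟨h1, h2⟩)
        · exact Or.inl hh
        · exact Or.inr (Or.inr ⟨h1, h2⟩)
        · exact Or.inr (Or.inl ⟨h1, h2⟩)

-- ----- the pair relation -----
def SRel (E : List (String × String)) (x y : String) : Prop :=
  Relation.EqvGen (fun u v => (u, v) ∈ E) x y

theorem srel_refl (E : List (String × String)) (x : String) : SRel E x x :=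
  Relation.EqvGen.refl x

theorem srel_symm {E : List (String × String)} {x y : String} (h : SRel E x y) : SRel E y x :=
  Relation.EqvGen.symm x y h

theorem srel_trans {E : List (String × String)} {x y z : String} (h1 : SRel E x y)
    (h2 : SRel E y z) : SRel E x z :=
  Relation.EqvGen.trans x y z h1 h2

theorem srel_nil {x y : String} : SRel [] x y ↔ x = y := by
  constructor
  · intro h
    induction h with
    | rel u v huv => simp at huv
    | refl u => rfl
    | symm u v _ ih => exact ih.symm
    | trans u v w _ _ ih1 ih2 => exact ih1.trans ih2
  · intro h; subst h; exact srel_refl [] x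

theorem srel_mono {E E' : List (String × String)} (hsub : ∀ p ∈ E, p ∈ E') {x y : String}
    (h : SRel E x y) : SRel E' x y := by
  induction h with
  | rel u v huv => exact Relation.EqvGen.rel u v (hsub _ huv)
  | refl u => exact Relation.EqvGen.refl u
  | symm u v _ ih => exact Relation.EqvGen.symm u v ih
  | trans u v w _ _ ih1 ih2 => exact Relation.EqvGen.trans u v w ih1 ih2

theorem srel_append_pair {E : List (String × String)} {a b x y : String} :
    SRel (E ++ [(a, b)]) x y ↔
      (SRel E x y ∨ (SRel E x a ∧ SRel E b y) ∨ (SRel E x b ∧ SRel E a y)) := by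
  constructor
  · intro h
    induction h with
    | rel u v huv =>
      rcases List.mem_append.mp huv with hm | hm
      · exact Or.inl (Relation.EqvGen.rel u v hm)
      · have hab : (u, v) = (a, b) := by simpa using hm
        obtain ⟨hu, hv⟩ := Prod.mk.injEq .. ▸ hab
        rcases Prod.mk.injEq u v a b ▸ hab with ⟨h1, h2⟩
        subst h1; subst h2
        exact Or.inr (Or.inl ⟨srel_refl E u, srel_refl E v⟩)
    | refl u => exact Or.inl (srel_refl E u)
    | symm u v _ ih =>
      rcases ih with hh | ⟨h1, h2⟩ | ⟨h1, h2⟩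
      · exact Or.inl (srel_symm hh)
      · exact Or.inr (Or.inr ⟨srel_symm h2, srel_symm h1⟩)
      · exact Or.inr (Or.inl ⟨srel_symm h2, srel_symm h1⟩)
    | trans u v w _ _ ih1 ih2 =>
      rcases ih1 with hh | ⟨h1, h2⟩ | ⟨h1, h2⟩ <;>
        rcases ih2 with gg | ⟨g1, g2⟩ | ⟨g1, g2⟩
      · exact Or.inl (srel_trans hh gg)
      · exact Or.inr (Or.inl ⟨srel_trans hh g1, g2⟩)
      · exact Or.inr (Or.inr ⟨srel_trans hh g1, g2⟩)
      · exact Or.inr (Or.inl ⟨h1, srel_trans h2 gg⟩)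
      · exact Or.inr (Or.inl ⟨h1, g2⟩)
      · exact Or.inl (srel_trans h1 g2)
      · exact Or.inr (Or.inr ⟨h1, srel_trans h2 gg⟩)
      · exact Or.inl (srel_trans h1 g2)
      · exact Or.inr (Or.inr ⟨h1, g2⟩)
  · have hmono : ∀ {u v : String}, SRel E u v → SRel (E ++ [(a, b)]) u v :=
      fun h => srel_mono (fun p hp => List.mem_append.mpr (Or.inl hp)) h
    have hab : SRel (E ++ [(a, b)]) a b :=
      Relation.EqvGen.rel a b (List.mem_append.mpr (Or.inr (by simp)))
    rintro (hh | ⟨h1, h2⟩ | ⟨h1, h2⟩)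
    · exact hmono hh
    · exact srel_trans (srel_trans (hmono h1) hab) (hmono h2)
    · exact srel_trans (srel_trans (hmono h1) (srel_symm hab)) (hmono h2)

theorem srel_const {E : List (String × String)} {g : String → String}
    (hg : ∀ pr ∈ E, g pr.1 = g pr.2) {x y : String} (h : SRel E x y) : g x = g y := by
  induction h with
  | rel u v huv => exact hg _ huv
  | refl u => rfl
  | symm u v _ ih => exact ih.symm
  | trans u v w _ _ ih1 ih2 => exact ih1.trans ih2

-- ----- setting up the initial parent/label dicts -----
def Kof (ids : List String) (pairs : List (String × String)) : List String :=
  PySem.Set.ofList (ids ++ pairs.flatMap (fun pr => [pr.1, pr.2]))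

theorem keys_of_selfmap {d : UFD} {S : List String}
    (hd : d.items = S.map (fun x => (x, x))) : d.keys = S := by
  simp [PySem.Dict.keys, hd, List.map_map, Function.comp_def]

theorem selfmap_insert {d : UFD} {S : List String}
    (hd : d.items = S.map (fun x => (x, x))) (x : String) :
    (d.insert x x).items = (PySem.Set.add S x).map (fun x => (x, x)) := by
  have hk : d.keys = S := keys_of_selfmap hd
  by_cases hc : d.contains x
  · rw [PySem.Dict.items_insert_of_contains d x hc, hd]
    have hxS : x ∈ S := hk ▸ (PySem.Dict.contains_iff_mem_keys d x).mp hc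
    have hadd : PySem.Set.add S x = S := by
      simp [PySem.Set.add, hxS]
    rw [hadd, List.map_map]
    apply List.map_congr_left
    intro s _
    by_cases hsx : s = x <;> simp [Function.comp, hsx]
  · rw [PySem.Dict.items_insert_of_not_contains d x (by simpa using hc), hd]
    have hxS : x ∉ S := fun hm =>
      by rw [(PySem.Dict.contains_iff_mem_keys d x).mpr (hk ▸ hm)] at hc; exact hc rfl
    have hadd : PySem.Set.add S x = S ++ [x] := by
      simp only [PySem.Set.add]
      rw [if_neg (by simpa [List.contains_iff_mem] using hxS)]
    rw [hadd]; simp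

theorem selfmap_setdefault {d : UFD} {S : List String}
    (hd : d.items = S.map (fun x => (x, x))) (x : String) :
    (d.setdefault x x).items = (PySem.Set.add S x).map (fun x => (x, x)) := by
  by_cases hc : d.contains x
  · rw [PySem.Dict.setdefault_of_contains d x hc, hd]
    have hxS : x ∈ S := (keys_of_selfmap hd) ▸ (PySem.Dict.contains_iff_mem_keys d x).mp hc
    have hadd : PySem.Set.add S x = S := by
      simp [PySem.Set.add, hxS]
    rw [hadd]
  · rw [PySem.Dict.setdefault_of_not_contains d x (by simpa using hc)]
    exact selfmap_insert hd x

theorem selfmap_fold_insert :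
    ∀ (l S : List String) (d : UFD), d.items = S.map (fun x => (x, x)) →
      (l.foldl (fun d x => d.insert x x) d).items =
        (PySem.Set.update S l).map (fun x => (x, x)) := by
  intro l
  induction l with
  | nil => intro S d hd; rw [List.foldl_nil, PySem.Set.update_nil]; exact hd
  | cons x t ih =>
    intro S d hd
    rw [List.foldl_cons, PySem.Set.update_cons]
    exact ih _ _ (selfmap_insert hd x)

theorem selfmap_fold_setdefault :
    ∀ (l S : List String) (d : UFD), d.items = S.map (fun x => (x, x)) →
      (l.foldl (fun d x => d.setdefault x x) d).items =
        (PySem.Set.update S l).map (fun x => (x, x)) := by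
  intro l
  induction l with
  | nil => intro S d hd; rw [List.foldl_nil, PySem.Set.update_nil]; exact hd
  | cons x t ih =>
    intro S d hd
    rw [List.foldl_cons, PySem.Set.update_cons]
    exact ih _ _ (selfmap_setdefault hd x)

theorem fold_setdefault_pairs :
    ∀ (pairs : List (String × String)) (d : UFD),
      pairs.foldl (fun d pr => (d.setdefault pr.1 pr.1).setdefault pr.2 pr.2) d =
        (pairs.flatMap (fun pr => [pr.1, pr.2])).foldl (fun d x => d.setdefault x x) d := by
  intro pairs
  induction pairs with
  | nil => intro d; simp
  | cons p t ih =>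
    intro d
    simp only [List.foldl_cons, List.flatMap_cons, List.foldl_append]
    rw [← ih]
    rfl

theorem pf_of_selfmap {d : UFD} {S : List String} (hS : S.Nodup)
    (hd : d.items = S.map (fun x => (x, x))) : ∀ x, pf d x = x := by
  intro x
  have hk : d.keys = S := keys_of_selfmap hd
  by_cases hx : x ∈ S
  · have hmem : (x, x) ∈ d.items := by rw [hd]; exact List.mem_map.mpr ⟨x, hx, rfl⟩
    exact PySem.Dict.getD_of_mem_items d hmem (hk ▸ hS) x
  · exact PySem.Dict.getD_of_not_contains d x
      (by rw [← Bool.not_eq_true]; intro hc; exact hx (hk ▸ (PySem.Dict.contains_iff_mem_keys d x).mp hc))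

theorem DecD_of_selfmap {d : UFD} {S : List String} (hS : S.Nodup)
    (hd : d.items = S.map (fun x => (x, x))) : DecD d :=
  ⟨(keys_of_selfmap hd) ▸ hS, fun x => Or.inl (pf_of_selfmap hS hd x)⟩

-- ----- the union loop -----
theorem union_fold :
    ∀ (E2 E1 : List (String × String)) (d : UFD), DecD d →
      (∀ pr ∈ E2, pr.1 ∈ d.keys ∧ pr.2 ∈ d.keys) →
      (∀ x y, Root d x = Root d y ↔ SRel E1 x y) →
      DecD (E2.foldl (fun d pr => ufUnion d pr.1 pr.2) d) ∧
      (E2.foldl (fun d pr => ufUnion d pr.1 pr.2) d).keys = d.keys ∧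
      ∀ x y, Root (E2.foldl (fun d pr => ufUnion d pr.1 pr.2) d) x =
          Root (E2.foldl (fun d pr => ufUnion d pr.1 pr.2) d) y ↔ SRel (E1 ++ E2) x y := by
  intro E2
  induction E2 with
  | nil =>
    intro E1 d hd _ hc
    refine ⟨hd, rfl, fun x y => ?_⟩
    rw [List.foldl_nil, List.append_nil]
    exact hc x y
  | cons p t ih =>
    intro E1 d hd hm hc
    obtain ⟨hd1, hk1, hc1raw⟩ :=
      union_spec hd (hm p (List.mem_cons_self ..)).1 (hm p (List.mem_cons_self ..)).2
    have hc1 : ∀ x y, Root (ufUnion d p.1 p.2) x = Root (ufUnion d p.1 p.2) y ↔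
        SRel (E1 ++ [p]) x y := by
      intro x y
      rw [hc1raw x y]
      have hp : (E1 ++ [p]) = (E1 ++ [(p.1, p.2)]) := by rfl
      rw [hp, srel_append_pair]
      constructor
      · rintro (hh | ⟨h1, h2⟩ | ⟨h1, h2⟩)
        · exact Or.inl ((hc x y).mp hh)
        · exact Or.inr (Or.inl ⟨(hc x p.1).mp h1, srel_symm ((hc y p.2).mp h2)⟩)
        · exact Or.inr (Or.inr ⟨(hc x p.2).mp h1, srel_symm ((hc y p.1).mp h2)⟩)
      · rintro (hh | ⟨h1, h2⟩ | ⟨h1, h2⟩)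
        · exact Or.inl ((hc x y).mpr hh)
        · exact Or.inr (Or.inl ⟨(hc x p.1).mpr h1, (hc y p.2).mpr (srel_symm h2)⟩)
        · exact Or.inr (Or.inr ⟨(hc x p.2).mpr h1, (hc y p.1).mpr (srel_symm h2)⟩)
    rw [List.foldl_cons]
    obtain ⟨ha1, ha2, ha3⟩ := ih (E1 ++ [p]) (ufUnion d p.1 p.2) hd1
      (fun pr hpr => by rw [hk1]; exact hm pr (List.mem_cons_of_mem _ hpr)) hc1
    refine ⟨ha1, ha2.trans hk1, fun x y => ?_⟩
    rw [ha3 x y]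
    have hassoc : (E1 ++ [p]) ++ t = E1 ++ (p :: t) := by simp
    rw [hassoc]

theorem fold_setdefault_id :
    ∀ (l : List String) (d : UFD), (∀ x ∈ l, x ∈ d.keys) →
      l.foldl (fun d x => d.setdefault x x) d = d := by
  intro l
  induction l with
  | nil => intro d _; rfl
  | cons x t ih =>
    intro d h
    rw [List.foldl_cons,
      PySem.Dict.setdefault_of_contains d x
        ((PySem.Dict.contains_iff_mem_keys d x).mpr (h x (List.mem_cons_self ..)))]
    exact ih d (fun y hy => h y (List.mem_cons_of_mem _ hy))

theorem update_absorb (ids l : List String) :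
    (PySem.Set.ofList ids).update (PySem.Set.update (PySem.Set.ofList ids) l) =
      PySem.Set.update (PySem.Set.ofList ids) l := by
  have hs : List.Nodup (PySem.Set.ofList ids) := PySem.Set.nodup_ofList ids
  have hK : PySem.Set.update (PySem.Set.ofList ids) l =
      PySem.Set.ofList ids ++
        List.filter (fun y => !(PySem.Set.ofList ids).contains y) (PySem.Set.ofList l) :=
    PySem.Set.update_eq_append_filter _ _
  have hnd : List.Nodup (PySem.Set.update (PySem.Set.ofList ids) l) :=
    PySem.Set.nodup_update _ _ hs
  have h1 : List.filter (fun y => !(PySem.Set.ofList ids).contains y) (PySem.Set.ofList ids) =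
      [] := by
    rw [List.filter_eq_nil_iff]
    intro a ha
    have hc : (PySem.Set.ofList ids).contains a = true := List.contains_iff_mem.mpr ha
    rw [hc]
    simp
  have h2 : List.filter (fun y => !(PySem.Set.ofList ids).contains y)
      (List.filter (fun y => !(PySem.Set.ofList ids).contains y) (PySem.Set.ofList l)) =
        List.filter (fun y => !(PySem.Set.ofList ids).contains y) (PySem.Set.ofList l) := by
    rw [List.filter_eq_self]
    intro a ha
    exact (List.mem_filter.mp ha).2
  calc (PySem.Set.ofList ids).update (PySem.Set.update (PySem.Set.ofList ids) l)
      = PySem.Set.ofList ids ++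
          List.filter (fun y => !(PySem.Set.ofList ids).contains y)
            (PySem.Set.ofList (PySem.Set.update (PySem.Set.ofList ids) l)) :=
        PySem.Set.update_eq_append_filter _ _
    _ = PySem.Set.ofList ids ++
          List.filter (fun y => !(PySem.Set.ofList ids).contains y)
            (PySem.Set.update (PySem.Set.ofList ids) l) := by
        rw [PySem.Set.ofList_eq_self_of_nodup _ hnd]
    _ = PySem.Set.update (PySem.Set.ofList ids) l := by
        rw [hK, List.filter_append, h1, h2, List.nil_append, ← hK]

-- ----- the final comprehension of A -----
theorem out_fold {R : String → String} :
    ∀ (l : List String) (acc : UFD) (d : UFD), DecD d → (∀ y, Root d y = R y) →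
      (∀ x ∈ l, acc.contains x = false) → l.Nodup →
      ((l.foldl (fun (acc : UFD × UFD) x =>
          let rd := ufFind acc.2.size acc.2 x
          (acc.1.insert x rd.1, rd.2)) (acc, d)).1).items =
        acc.items ++ l.map (fun x => (x, R x)) := by
  intro l
  induction l with
  | nil => intro acc d _ _ _ _; simp
  | cons x t ih =>
    intro acc d hd hR hfresh hnd
    obtain ⟨hf1, hf2, hf3, hf4⟩ := find_spec hd d.size x (mu_le_size d x)
    rw [List.foldl_cons]
    show (List.foldl (fun (acc : UFD × UFD) x =>
          let rd := ufFind acc.2.size acc.2 x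
          (acc.1.insert x rd.1, rd.2))
        ((acc.insert x (ufFind d.size d x).1 : UFD), (ufFind d.size d x).2) t).1.items =
      acc.items ++ (x :: t).map (fun x => (x, R x))
    rw [hf1, hR x]
    have hload := ih (acc.insert x (R x)) (ufFind d.size d x).2 hf2
      (fun y => (hf4 y).trans (hR y))
      (fun y hy => by
        rw [PySem.Dict.contains_insert]
        have hyx : (y == x) = false := by
          simp only [beq_eq_false_iff_ne, ne_eq]
          intro hyx; subst hyx; exact (List.nodup_cons.mp hnd).1 hy
        rw [hyx, hfresh y (List.mem_cons_of_mem _ hy)]; rfl)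
      (List.nodup_cons.mp hnd).2
    rw [hload, PySem.Dict.items_insert_of_not_contains acc (R x)
      (hfresh x (List.mem_cons_self ..))]
    simp

-- ----- B side: label propagation -----
def BInv (E : List (String × String)) (K : List String) (l : UFD) : Prop :=
  l.keys = K ∧ ∀ v ∈ K, pf l v ∈ K ∧ pf l v ≤ v ∧ SRel E v (pf l v)

theorem pf_lpStep (l : UFD) (pr : String × String) (v : String) :
    pf (lpStep l pr) v =
      if v = pr.2 then (if pf l pr.1 ≤ pf l pr.2 then pf l pr.1 else pf l pr.2)
      else if v = pr.1 then (if pf l pr.1 ≤ pf l pr.2 then pf l pr.1 else pf l pr.2)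
      else pf l v := by
  simp only [lpStep, pf, PySem.Dict.getD_insert]

theorem step_mono (l : UFD) (pr : String × String) (v : String) :
    pf (lpStep l pr) v ≤ pf l v := by
  rw [pf_lpStep]
  by_cases h2 : v = pr.2
  · subst h2
    rw [if_pos rfl]
    split_ifs with hm
    · exact hm
    · exact le_refl _
  · rw [if_neg h2]
    by_cases h1 : v = pr.1
    · subst h1
      rw [if_pos rfl]
      split_ifs with hm
      · exact le_refl _
      · exact (not_le.mp hm).le
    · rw [if_neg h1]

theorem fold_mono : ∀ (E : List (String × String)) (l : UFD) (v : String),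
    pf (E.foldl lpStep l) v ≤ pf l v := by
  intro E
  induction E with
  | nil => intro l v; exact le_refl _
  | cons p t ih =>
    intro l v
    rw [List.foldl_cons]
    exact le_trans (ih _ v) (step_mono l p v)

theorem keys_lpStep {l : UFD} {pr : String × String} (h1 : pr.1 ∈ l.keys)
    (h2 : pr.2 ∈ l.keys) : (lpStep l pr).keys = l.keys := by
  have hc1 : l.contains pr.1 = true := (PySem.Dict.contains_iff_mem_keys l pr.1).mpr h1
  have hgen : ∀ m : String, ((l.insert pr.1 m).insert pr.2 m).keys = l.keys := by
    intro m
    have hc2 : (l.insert pr.1 m).contains pr.2 = true := by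
      rw [PySem.Dict.contains_insert, (PySem.Dict.contains_iff_mem_keys l pr.2).mpr h2]
      simp
    rw [PySem.Dict.keys_insert_of_contains _ _ hc2, PySem.Dict.keys_insert_of_contains _ _ hc1]
  exact hgen _

theorem binv_lpStep {E : List (String × String)} {K : List String} {l : UFD}
    {pr : String × String} (h : BInv E K l) (hpr : pr ∈ E) (h1 : pr.1 ∈ K) (h2 : pr.2 ∈ K) :
    BInv E K (lpStep l pr) := by
  obtain ⟨hk, hv⟩ := h
  refine ⟨by rw [keys_lpStep (hk ▸ h1) (hk ▸ h2)]; exact hk, fun v hvK => ?_⟩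
  obtain ⟨ha1, ha2, ha3⟩ := hv pr.1 h1
  obtain ⟨hb1, hb2, hb3⟩ := hv pr.2 h2
  have hedge : SRel E pr.1 pr.2 := Relation.EqvGen.rel _ _ hpr
  rw [pf_lpStep]
  by_cases hv2 : v = pr.2
  · subst hv2
    rw [if_pos rfl]
    split_ifs with hm
    · exact ⟨ha1, le_trans hm hb2, srel_trans (srel_symm hedge) ha3⟩
    · exact ⟨hb1, hb2, hb3⟩
  · rw [if_neg hv2]
    by_cases hv1 : v = pr.1
    · subst hv1
      rw [if_pos rfl]
      split_ifs with hm
      · exact ⟨ha1, ha2, ha3⟩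
      · exact ⟨hb1, le_trans (not_le.mp hm).le ha2, srel_trans hedge hb3⟩
    · rw [if_neg hv1]
      exact hv v hvK

theorem binv_fold {E : List (String × String)} {K : List String} :
    ∀ (E2 : List (String × String)) (l : UFD),
      (∀ pr ∈ E2, pr ∈ E ∧ pr.1 ∈ K ∧ pr.2 ∈ K) → BInv E K l → BInv E K (E2.foldl lpStep l) := by
  intro E2
  induction E2 with
  | nil => intro l _ h; exact h
  | cons p t ih =>
    intro l hm h
    rw [List.foldl_cons]
    obtain ⟨hp1, hp2, hp3⟩ := hm p (List.mem_cons_self ..)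
    exact ih _ (fun pr hpr => hm pr (List.mem_cons_of_mem _ hpr)) (binv_lpStep h hp1 hp2 hp3)

theorem binv_round {E : List (String × String)} {K : List String} {l : UFD}
    (hE : ∀ pr ∈ E, pr.1 ∈ K ∧ pr.2 ∈ K) (h : BInv E K l) : BInv E K (lpRound E l) :=
  binv_fold E l (fun pr hpr => ⟨hpr, (hE pr hpr).1, (hE pr hpr).2⟩) h

theorem dict_eq_of_pf_eq {l l' : UFD} (hk : l'.keys = l.keys) (hn : l.keys.Nodup)
    (hpf : ∀ v ∈ l.keys, pf l' v = pf l v) : l' = l := by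
  have irrel : ∀ (d : UFD) (k : String), d.contains k = true →
      ∀ d0 : String, d.getD k d0 = d.getD k k := by
    intro d k hc d0
    rw [PySem.Dict.contains_eq_isSome_get?] at hc
    obtain ⟨v, hv⟩ := Option.isSome_iff_exists.mp hc
    rw [PySem.Dict.getD_of_get?_eq_some _ _ hv, PySem.Dict.getD_of_get?_eq_some _ _ hv]
  apply PySem.Dict.ext
  rw [PySem.Dict.items_eq_map_keys l' (hk ▸ hn) "", PySem.Dict.items_eq_map_keys l hn "", hk]
  apply List.map_congr_left
  intro k hkm
  have h1 : l.contains k = true := (PySem.Dict.contains_iff_mem_keys l k).mpr hkm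
  have h2 : l'.contains k = true := (PySem.Dict.contains_iff_mem_keys l' k).mpr (hk ▸ hkm)
  rw [irrel l k h1 "", irrel l' k h2 ""]
  exact congrArg (fun w => (k, w)) (hpf k hkm)

def muK (K : List String) (x : String) : Nat := (K.filter (fun k => decide (k < x))).length

def Phi (K : List String) (l : UFD) : Nat := (K.map (fun v => muK K (pf l v))).sum

theorem sum_map_lt {l : List String} {f g : String → Nat} (hle : ∀ x ∈ l, f x ≤ g x)
    {x0 : String} (hx0 : x0 ∈ l) (hlt : f x0 < g x0) : (l.map f).sum < (l.map g).sum := by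
  induction l with
  | nil => cases hx0
  | cons y t ih =>
    simp only [List.map_cons, List.sum_cons]
    rcases List.mem_cons.mp hx0 with hy | hy
    · subst hy
      have hrest : (t.map f).sum ≤ (t.map g).sum :=
        List.sum_le_sum (fun i hi => hle i (List.mem_cons_of_mem _ hi))
      omega
    · have h1 : f y ≤ g y := hle y (List.mem_cons_self ..)
      have h2 := ih (fun x hx => hle x (List.mem_cons_of_mem _ hx)) hy
      omega

theorem round_decrease {E : List (String × String)} {K : List String} {l : UFD}
    (hKnd : K.Nodup) (hE : ∀ pr ∈ E, pr.1 ∈ K ∧ pr.2 ∈ K) (h : BInv E K l)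
    (hne : lpRound E l ≠ l) : Phi K (lpRound E l) < Phi K l := by
  have h' := binv_round hE h
  have hne' : ∃ v ∈ K, pf (lpRound E l) v ≠ pf l v := by
    by_contra hc
    push Not at hc
    exact hne (dict_eq_of_pf_eq (by rw [h'.1, h.1]) (h.1 ▸ hKnd)
      (fun v hv => hc v (h.1 ▸ hv)))
  obtain ⟨v0, hv0K, hv0⟩ := hne'
  refine sum_map_lt (fun x _ => filter_lt_mono_le (fold_mono E l x)) hv0K ?_
  have hlt : pf (lpRound E l) v0 < pf l v0 := lt_of_le_of_ne (fold_mono E l v0) hv0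
  exact filter_lt_strict hlt (h'.2 v0 hv0K).1

theorem loop_fix {E : List (String × String)} {K : List String} (hKnd : K.Nodup)
    (hE : ∀ pr ∈ E, pr.1 ∈ K ∧ pr.2 ∈ K) :
    ∀ (fuel : Nat) (l : UFD), BInv E K l → Phi K l < fuel →
      BInv E K (lpLoop fuel E l) ∧ lpRound E (lpLoop fuel E l) = lpLoop fuel E l := by
  intro fuel
  induction fuel with
  | zero => intro l _ h; omega
  | succ n ih =>
    intro l hB hPhi
    simp only [lpLoop]
    by_cases hc : lpRound E l = l
    · rw [if_pos hc]; exact ⟨hB, hc⟩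
    · rw [if_neg hc]
      exact ih (lpRound E l) (binv_round hE hB)
        (by have := round_decrease hKnd hE hB hc; omega)

theorem phi_lt {K : List String} {l0 : UFD} (hpf : ∀ v, pf l0 v = v) :
    Phi K l0 < K.length * K.length + 1 := by
  have h1 : Phi K l0 = (K.map (fun v => muK K v)).sum := by
    unfold Phi
    exact congrArg List.sum (List.map_congr_left (fun v _ => by rw [hpf v]))
  have h2 : (K.map (fun v => muK K v)).sum ≤ (K.map (fun v => muK K v)).length • K.length := by
    apply List.sum_le_card_nsmul
    intro x hx
    obtain ⟨v, _, hv⟩ := List.mem_map.mp hx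
    rw [← hv]
    exact List.length_filter_le _ _
  rw [List.length_map, smul_eq_mul] at h2
  omega

theorem fix_edges {E : List (String × String)} {l : UFD} (hfix : lpRound E l = l) :
    ∀ pr ∈ E, pf l pr.1 = pf l pr.2 := by
  intro pr hpr
  obtain ⟨s, t, hE⟩ := List.append_of_mem hpr
  subst hE
  have hfold : t.foldl lpStep (lpStep (s.foldl lpStep l) pr) = l := by
    conv_rhs => rw [← hfix]
    unfold lpRound
    rw [List.foldl_append, List.foldl_cons]
  have hsand : ∀ v, pf l v = pf (lpStep (s.foldl lpStep l) pr) v := by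
    intro v
    have h1 : pf (lpStep (s.foldl lpStep l) pr) v ≤ pf (s.foldl lpStep l) v := step_mono _ _ _
    have h2 : pf (s.foldl lpStep l) v ≤ pf l v := fold_mono s l v
    have h3 : pf l v ≤ pf (lpStep (s.foldl lpStep l) pr) v := by
      conv_lhs => rw [← hfold]
      exact fold_mono t _ v
    exact le_antisymm h3 (le_trans h1 h2)
  have hsand1 : ∀ v, pf (s.foldl lpStep l) v = pf l v := by
    intro v
    refine le_antisymm (fold_mono s l v) ?_
    exact le_trans (hsand v).le (step_mono _ _ _)
  have hm2 : pf l pr.2 =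
      (if pf l pr.1 ≤ pf l pr.2 then pf l pr.1 else pf l pr.2) := by
    conv_lhs => rw [hsand pr.2]
    rw [pf_lpStep, if_pos rfl, hsand1 pr.1, hsand1 pr.2]
  have hm1 : pf l pr.1 =
      (if pf l pr.1 ≤ pf l pr.2 then pf l pr.1 else pf l pr.2) := by
    conv_lhs => rw [hsand pr.1]
    rw [pf_lpStep, hsand1 pr.1, hsand1 pr.2]
    by_cases h12 : pr.1 = pr.2
    · rw [if_pos h12]
    · rw [if_neg h12, if_pos rfl]
  exact hm1.trans hm2.symm

theorem alt_out {K : List String} (lf : UFD) (hnd : K.Nodup) :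
    (K.foldl (fun d v => d.insert v (lf.getD v v)) (PySem.Dict.empty : UFD)).items =
      K.map (fun v => (v, pf lf v)) := by
  have h := PySem.Dict.items_foldl_insert_fresh K (fun a => a) (fun a => lf.getD a a)
    (PySem.Dict.empty : UFD) (fun a _ => PySem.Dict.contains_empty a) (by simpa using hnd)
  simpa [pf] using h

-- ===== VERDICT (by name: the statement is the Claim_ definition above) =====
-- ----- assembly -----
theorem canon_eq {pairs : List (String × String)} {cA cB x : String}
    (hArel : SRel pairs x cA) (hAmin : ∀ y, SRel pairs x y → cA ≤ y)
    (hBrel : SRel pairs x cB) (hBmin : ∀ y, SRel pairs x y → cB ≤ y) : cA = cB :=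
  le_antisymm (hAmin _ hBrel) (hBmin _ hArel)

theorem uf_project_to_canonical_py_spec : Claim_equal_uf_project_to_canonical_py := by
  intro ids pairs _
  unfold Spec_uf_project_to_canonical_py
  -- shared notation
  set flat := pairs.flatMap (fun pr => [pr.1, pr.2]) with hflat
  set K := Kof ids pairs with hKdef
  have hKofList : K = PySem.Set.ofList (ids ++ flat) := rfl
  have hKnd : K.Nodup := by rw [hKofList]; exact PySem.Set.nodup_ofList _
  have hKupd : K = PySem.Set.update (PySem.Set.ofList ids) flat := by
    rw [hKofList, PySem.Set.ofList_append]
  have hmemK : ∀ pr ∈ pairs, pr.1 ∈ K ∧ pr.2 ∈ K := by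
    intro pr hpr
    constructor <;>
    · rw [hKofList, PySem.Set.mem_ofList]
      refine List.mem_append.mpr (Or.inr ?_)
      rw [hflat]
      exact List.mem_flatMap.mpr ⟨pr, hpr, by simp⟩
  have hidsK : ∀ x ∈ ids, x ∈ K := by
    intro x hx
    rw [hKofList, PySem.Set.mem_ofList]
    exact List.mem_append.mpr (Or.inl hx)
  -- ===== A side =====
  set p0 := ids.foldl (fun d x => d.insert x x) (PySem.Dict.empty : UFD) with hp0
  set p1 := pairs.foldl (fun d pr => (d.setdefault pr.1 pr.1).setdefault pr.2 pr.2) p0 with hp1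
  set p2 := pairs.foldl (fun d pr => ufUnion d pr.1 pr.2) p1 with hp2
  have hp0items : p0.items = (PySem.Set.ofList ids).map (fun x => (x, x)) := by
    rw [hp0, selfmap_fold_insert ids [] PySem.Dict.empty (by rfl), PySem.Set.update_nil_left]
  have hp1items : p1.items = K.map (fun x => (x, x)) := by
    rw [hp1, fold_setdefault_pairs pairs p0, ← hflat,
      selfmap_fold_setdefault flat (PySem.Set.ofList ids) p0 hp0items, ← hKupd]
  have hDec1 : DecD p1 := DecD_of_selfmap hKnd hp1items
  have hkeys1 : p1.keys = K := keys_of_selfmap hp1items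
  have hpf1 : ∀ x, pf p1 x = x := pf_of_selfmap hKnd hp1items
  have hconn1 : ∀ x y, Root p1 x = Root p1 y ↔ SRel [] x y := by
    intro x y
    rw [Root_fix (hpf1 x), Root_fix (hpf1 y), srel_nil]
  obtain ⟨hDec2, hkeys2, hconn2⟩ := union_fold pairs [] p1 hDec1
    (fun pr hpr => ⟨hkeys1 ▸ (hmemK pr hpr).1, hkeys1 ▸ (hmemK pr hpr).2⟩) hconn1
  rw [← hp2] at hDec2 hkeys2 hconn2
  have hconn : ∀ x y, Root p2 x = Root p2 y ↔ SRel pairs x y := by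
    intro x y
    rw [hconn2 x y, List.nil_append]
  have hkeysK : p2.keys = K := hkeys2.trans hkeys1
  have hp3 : (PySem.Set.ofList ids).foldl (fun d x => d.setdefault x x) p2 = p2 := by
    apply fold_setdefault_id
    intro x hx
    rw [hkeysK]
    exact hidsK x ((PySem.Set.mem_ofList ids x).mp hx)
  have huniv : (PySem.Set.ofList ids).update p2.keys = K := by
    rw [hkeysK, hKupd]
    exact update_absorb ids flat
  have hAval : uf_project_to_canonical_py ids pairs = K.map (fun x => (x, Root p2 x)) := by
    have hdef : uf_project_to_canonical_py ids pairs =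
        (((PySem.Set.ofList ids).update
            ((PySem.Set.ofList ids).foldl (fun d x => d.setdefault x x) p2).keys).foldl
          (fun (acc : UFD × UFD) x =>
            let rd := ufFind acc.2.size acc.2 x
            (acc.1.insert x rd.1, rd.2)) ((PySem.Dict.empty : UFD), 
              (PySem.Set.ofList ids).foldl (fun d x => d.setdefault x x) p2)).1.items := rfl
    rw [hdef, hp3, huniv]
    have h := out_fold (R := fun y => Root p2 y) K PySem.Dict.empty p2 hDec2
      (fun y => rfl) (fun x _ => PySem.Dict.contains_empty x) hKnd
    rw [h]
    rfl
  -- ===== B side =====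
  set l0 := K.foldl (fun d v => d.insert v v) (PySem.Dict.empty : UFD) with hl0
  set lf := lpLoop (K.length * K.length + 1) pairs l0 with hlf
  have hl0items : l0.items = K.map (fun x => (x, x)) := by
    rw [hl0, selfmap_fold_insert K [] PySem.Dict.empty (by rfl), PySem.Set.update_nil_left,
      PySem.Set.ofList_eq_self_of_nodup _ hKnd]
  have hpf0 : ∀ x, pf l0 x = x := pf_of_selfmap hKnd hl0items
  have hB0 : BInv pairs K l0 := by
    refine ⟨keys_of_selfmap hl0items, fun v hv => ?_⟩
    rw [hpf0 v]
    exact ⟨hv, le_refl _, srel_refl pairs v⟩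
  obtain ⟨hBf, hfx⟩ := loop_fix hKnd hmemK (K.length * K.length + 1) l0 hB0 (phi_lt hpf0)
  rw [← hlf] at hBf hfx
  have hed : ∀ pr ∈ pairs, pf lf pr.1 = pf lf pr.2 := fix_edges hfx
  have hBval : uf_project_to_canonical_py_alt ids pairs = K.map (fun v => (v, pf lf v)) := by
    have hdef : uf_project_to_canonical_py_alt ids pairs =
        (K.foldl (fun d v => d.insert v (lf.getD v v)) (PySem.Dict.empty : UFD)).items := rfl
    rw [hdef]
    exact alt_out lf hKnd
  -- ===== both equal the canonical map =====
  rw [hAval, hBval]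
  apply List.map_congr_left
  intro x hxK
  refine congrArg (fun w => (x, w)) ?_
  have hArel : SRel pairs x (Root p2 x) := by
    refine (hconn x (Root p2 x)).mp ?_
    rw [Root_fix (root_fixpt hDec2 x)]
  have hAmin : ∀ y, SRel pairs x y → Root p2 x ≤ y := by
    intro y hy
    rw [(hconn x y).mpr hy]
    exact root_le hDec2 y
  have hBle : ∀ y, pf lf y ≤ y := by
    intro y
    by_cases hyK : y ∈ K
    · exact (hBf.2 y hyK).2.1
    · have hnc : lf.contains y = false := by
        rw [← Bool.not_eq_true]
        intro hcy
        exact hyK (hBf.1 ▸ (PySem.Dict.contains_iff_mem_keys lf y).mp hcy)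
      rw [pf, PySem.Dict.getD_of_not_contains lf y hnc]
  have hBrel : SRel pairs x (pf lf x) := (hBf.2 x hxK).2.2
  have hBmin : ∀ y, SRel pairs x y → pf lf x ≤ y := by
    intro y hy
    rw [srel_const hed hy]
    exact hBle y
  exact canon_eq hArel hAmin hBrel hBmin
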